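-- pv_equiv track=rewrite | github.com/TheTechOddBug/lon-mirror | examples/structural_dynamics_mod9.py | orbit
-- ===== SOURCE A (Python) =====
-- def digit_sum(n: int) -> int:
--     return sum(int(d) for d in str(abs(n)))
--
-- def digital_root(n: int) -> int:
--     if n == 0:
--         return 9
--     while n >= 10:
--         n = digit_sum(n)
--     return n
--
-- def T(k: int, x: int) -> int:
--     return digital_root(k * x)
--
-- def orbit(k: int, start: int, max_steps: int = 30):
--     seen = {}
--     seq = []
--     x = start
--
--     for step in range(max_steps):
--         if x in seen:
--             c = seen[x]
--             return seq, c
--         seen[x] = step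
--         seq.append(x)
--         x = T(k, x)
--
--     return seq, None
-- ===== SOURCE B (Python) =====
-- def digital_root(n: int) -> int:
--     if n == 0:
--         return 9
--     if n < 0:
--         return n
--     return 1 + (n - 1) % 9
--
-- def orbit(k: int, start: int, max_steps: int = 30):
--     seq = []
--     found = set()
--     x = start
--     while len(seq) < max_steps:
--         if x in found:
--             return seq, seq.index(x)
--         found.add(x)
--         seq.append(x)
--         x = digital_root(k * x)
--     return seq, None
-- ===== Notes on version B (the rewrite author's own statement) =====
-- stated objective: alternative
-- what changed: B computes the digital root in closed form as 1 + (n - 1) % 9 instead of A's repeated string-based digit summing, and detects the first repeat with a membership set plus one list.index call in a while-loop instead of A's step-indexed dict in a counted for-loop.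
import Mathlib
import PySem

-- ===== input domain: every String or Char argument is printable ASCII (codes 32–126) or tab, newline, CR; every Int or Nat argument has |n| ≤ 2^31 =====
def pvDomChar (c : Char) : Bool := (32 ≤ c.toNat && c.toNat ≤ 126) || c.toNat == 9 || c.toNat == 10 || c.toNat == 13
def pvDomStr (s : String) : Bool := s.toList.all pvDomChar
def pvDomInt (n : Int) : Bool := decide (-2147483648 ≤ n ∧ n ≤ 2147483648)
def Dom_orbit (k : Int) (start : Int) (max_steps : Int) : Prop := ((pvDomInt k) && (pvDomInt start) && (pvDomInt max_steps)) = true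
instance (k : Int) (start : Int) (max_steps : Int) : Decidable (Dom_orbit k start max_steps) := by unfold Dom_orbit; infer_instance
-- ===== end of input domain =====

-- B replaces the string-based digit-sum iteration by the closed-form digital root 1 + (n-1) % 9 and
-- splits A's fused generate-and-detect loop into a build-trajectory pass followed by a duplicate scan
-- (objective: alternative; same outputs everywhere).

-- ===== PORT A =====
-- digit_sum: sum(int(d) for d in str(abs(n))).  int(d) on a single digit char never raises,
-- so the `getD 0` default is unreachable.
def digitSum (n : Int) : Int :=
  ((PySem.Int.toChars |n|).map (fun c => (PySem.Int.ofChars? [c]).getD 0)).sum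

-- The next three lemmas are cited by the port's `decreasing_by` (termination of the while loop).
theorem toDigitsCore_eq_digits : ∀ (fuel m : Nat) (acc : List Char), 0 < m → m < 10 ^ fuel →
    Nat.toDigitsCore 10 fuel m acc
      = ((Nat.digits 10 m).reverse.map Nat.digitChar) ++ acc := by
  intro fuel
  induction fuel with
  | zero => intro m acc h1 h2; rw [pow_zero] at h2; omega
  | succ f ih =>
    intro m acc h1 h2
    rw [Nat.toDigitsCore]
    rw [Nat.digits_def' (by norm_num : 1 < 10) h1]
    by_cases hd : m / 10 = 0
    · simp [hd]
    · have hb : m < 10 * 10 ^ f := by rw [← pow_succ']; exact h2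
      have hrec := ih (m / 10) ((m % 10).digitChar :: acc) (Nat.pos_of_ne_zero hd)
        (Nat.div_lt_of_lt_mul hb)
      simp [hd, hrec]

theorem digitSum_eq_digits_sum (n : Int) :
    digitSum n = ((Nat.digits 10 n.natAbs).sum : Int) := by
  have sum_map_val : ∀ (l : List Nat), (∀ d ∈ l, d < 10) →
      (l.map (fun d => (PySem.Int.ofChars? [Nat.digitChar d]).getD 0)).sum = (l.sum : Int) := by
    intro l hl
    induction l with
    | nil => simp
    | cons a t ih =>
      have ha : (PySem.Int.ofChars? [Nat.digitChar a]).getD 0 = (a : Int) := by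
        have : a < 10 := hl a (by simp)
        interval_cases a <;> decide
      simp [ha, ih (fun d hd => hl d (by simp [hd]))]
  rcases Nat.eq_zero_or_pos n.natAbs with h0 | hpos
  · have hn0 : n = 0 := by omega
    subst hn0; decide
  · have habs : |n| = (n.natAbs : Int) := Int.abs_eq_natAbs n
    have hfuel : n.natAbs < 10 ^ (n.natAbs + 1) := by
      calc n.natAbs < 2 ^ (n.natAbs + 1) := Nat.lt_two_pow_self.trans
            (Nat.pow_lt_pow_right (by norm_num) (Nat.lt_succ_self _))
      _ ≤ 10 ^ (n.natAbs + 1) := Nat.pow_le_pow_left (by norm_num) _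
    have htc : PySem.Int.toChars |n| = Nat.toDigits 10 n.natAbs := by
      rw [habs]; unfold PySem.Int.toChars; rw [if_neg (by omega)]
      rw [Int.toNat_natCast]
    rw [digitSum, htc, Nat.toDigits, toDigitsCore_eq_digits _ _ _ hpos hfuel]
    rw [List.append_nil, List.map_map]
    have := sum_map_val (Nat.digits 10 n.natAbs).reverse
      (fun d hd => Nat.digits_lt_base (by norm_num) (List.mem_reverse.mp hd))
    simpa [Function.comp, List.sum_reverse] using this

theorem digitSum_lt_self {n : Int} (h : 10 ≤ n) : (digitSum n).toNat < n.toNat := by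
  rw [digitSum_eq_digits_sum]
  have hd : Nat.digits 10 n.natAbs = n.natAbs % 10 :: Nat.digits 10 (n.natAbs / 10) :=
    Nat.digits_def' (by norm_num) (by omega)
  have hle := Nat.digit_sum_le 10 (n.natAbs / 10)
  have hsum : (Nat.digits 10 n.natAbs).sum = n.natAbs % 10 + (Nat.digits 10 (n.natAbs / 10)).sum := by
    rw [hd]; simp
  omega

-- digital_root's while loop: `while n >= 10: n = digit_sum(n)`.
def drLoop (n : Int) : Int :=
  if h : 10 ≤ n then drLoop (digitSum n) else n
termination_by n.toNat
decreasing_by exact digitSum_lt_self h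

def digitalRoot (n : Int) : Int :=
  if n = 0 then 9 else drLoop n

def Tfun (k : Int) (x : Int) : Int := digitalRoot (k * x)

-- the for-loop of orbit; fuel = remaining iterations, step = current loop index
-- (the Python list `seq` is an Array: append is push; it is returned as a List)
def orbitLoop (k : Int) (seen : PySem.Dict Int Int) (seq : Array Int) (x : Int) (step : Int) :
    Nat → List Int × Option Int
  | 0 => (seq.toList, none)
  | f + 1 =>
    match seen.get? x with
    | some c => (seq.toList, some c)
    | none => orbitLoop k (seen.insert x step) (seq.push x) (Tfun k x) (step + 1) f

def orbit (k : Int) (start : Int) (max_steps : Int) : List Int × Option Int :=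
  orbitLoop k PySem.Dict.empty #[] start 0 max_steps.toNat

-- ===== PORT B =====
def digitalRootAlt (n : Int) : Int :=
  if n = 0 then 9
  else if n < 0 then n
  else 1 + PySem.Int.mod (n - 1) 9

-- the while-loop of B: `while len(seq) < max_steps`; the Python list `seq` is an Array
-- (append is push, returned as a List), `found` is a Python set.
def orbitLoopB (k : Int) (maxSteps : Int) (seq : Array Int) (found : PySem.Set Int) (x : Int) :
    List Int × Option Int :=
  if h : (seq.size : Int) < maxSteps then
    if PySem.Set.contains found x then
      match PySem.List.index? seq.toList x with
      | some j => (seq.toList, some (j : Int))   -- seq.index(x)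
      | none => (seq.toList, none)               -- unreachable: x ∈ found ⇒ x ∈ seq, .index cannot raise
    else
      orbitLoopB k maxSteps (seq.push x) (PySem.Set.add found x) (digitalRootAlt (k * x))
  else (seq.toList, none)
termination_by (maxSteps - seq.size).toNat
decreasing_by simp; omega

def orbit_alt (k : Int) (start : Int) (max_steps : Int) : List Int × Option Int :=
  orbitLoopB k max_steps #[] PySem.Set.empty start

-- ===== PRECONDITION & SPEC =====
def Spec_orbit (k : Int) (start : Int) (max_steps : Int) (out : List Int × Option Int) : Prop := out = orbit_alt k start max_steps
instance (k : Int) (start : Int) (max_steps : Int) (out : List Int × Option Int) : Decidable (Spec_orbit k start max_steps out) := by unfold Spec_orbit; infer_instance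

-- ===== CLAIM (what is proved, stated in full; the proofs are below) =====
def Claim_equal_orbit : Prop := ∀ (k : Int) (start : Int) (max_steps : Int), Dom_orbit k start max_steps → Spec_orbit k start max_steps (orbit k start max_steps)

-- ===== LEMMAS AND PROOFS =====

theorem digitSum_pos {n : Int} (h : 1 ≤ n) : 1 ≤ digitSum n := by
  rw [digitSum_eq_digits_sum]
  have hne : n.natAbs ≠ 0 := by omega
  have hlast := Nat.getLast_digit_ne_zero 10 hne
  have hmem : (Nat.digits 10 n.natAbs).getLast (Nat.digits_ne_nil_iff_ne_zero.mpr hne)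
      ∈ Nat.digits 10 n.natAbs := List.getLast_mem _
  have hle : (Nat.digits 10 n.natAbs).getLast (Nat.digits_ne_nil_iff_ne_zero.mpr hne)
      ≤ (Nat.digits 10 n.natAbs).sum := List.le_sum_of_mem hmem
  omega

theorem digitSum_mod_nine {n : Int} (h : 0 ≤ n) : digitSum n % 9 = n % 9 := by
  rw [digitSum_eq_digits_sum]
  have hm : n.natAbs % 9 = (Nat.digits 10 n.natAbs).sum % 9 := Nat.modEq_nine_digits_sum n.natAbs
  omega

theorem mod_nine_eq (a : Int) : PySem.Int.mod a 9 = a % 9 := by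
  simp [pysem]

theorem drLoop_closed : ∀ (m : Nat) (n : Int), n.toNat = m → 1 ≤ n → drLoop n = 1 + (n - 1) % 9 := by
  intro m
  induction m using Nat.strong_induction_on with
  | _ m ih =>
    intro n hm h1
    rw [drLoop]
    by_cases h10 : 10 ≤ n
    · rw [dif_pos h10]
      have hlt := digitSum_lt_self h10
      have hpos := digitSum_pos (by omega : (1:Int) ≤ n)
      rw [ih (digitSum n).toNat (by omega) (digitSum n) rfl hpos]
      have hmod := digitSum_mod_nine (by omega : (0:Int) ≤ n)
      omega
    · rw [dif_neg h10]
      omega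

theorem T_eq (k x : Int) : Tfun k x = digitalRootAlt (k * x) := by
  unfold Tfun digitalRoot digitalRootAlt
  by_cases h0 : k * x = 0
  · simp [h0]
  · rw [if_neg h0, if_neg h0]
    by_cases hneg : k * x < 0
    · rw [if_pos hneg, drLoop, dif_neg (by omega)]
    · rw [if_neg hneg, drLoop_closed (k * x).toNat (k * x) rfl (by omega), mod_nine_eq]

-- main correspondence: A's dict-indexed for-loop = B's set+index while-loop
theorem loop_eq (k m : Int) : ∀ (fuel : Nat) (seq : Array Int) (seen : PySem.Dict Int Int)
    (found : PySem.Set Int) (x : Int),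
    fuel = (m - (seq.size : Int)).toNat →
    (∀ v, seen.get? v = (PySem.List.index? seq.toList v).map (fun j => (j : Int))) →
    (∀ v, PySem.Set.contains found v = true ↔ v ∈ seq.toList) →
    orbitLoop k seen seq x (seq.size : Int) fuel = orbitLoopB k m seq found x := by
  intro fuel
  induction fuel with
  | zero =>
    intro seq seen found x hf hdict hset
    rw [orbitLoop, orbitLoopB, dif_neg (by omega)]
  | succ f ih =>
    intro seq seen found x hf hdict hset
    have hlt : (seq.size : Int) < m := by omega
    rw [orbitLoop, orbitLoopB, dif_pos hlt]
    by_cases hx : x ∈ seq.toList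
    · rw [if_pos ((hset x).mpr hx)]
      match hidx : PySem.List.index? seq.toList x with
      | some j => rw [hdict x, hidx]; rfl
      | none => exact absurd hx ((PySem.List.index?_eq_none_iff _ _).mp hidx)
    · rw [if_neg (fun hcc => hx ((hset x).mp hcc))]
      have hnone : seen.get? x = none := by
        rw [hdict x, (PySem.List.index?_eq_none_iff _ _).mpr hx]
        rfl
      rw [hnone]
      have hdict' : ∀ v, (seen.insert x (seq.size : Int)).get? v
          = (PySem.List.index? (seq.push x).toList v).map (fun j => (j : Int)) := by
        intro v
        rw [Array.toList_push]
        by_cases hv : v = x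
        · subst hv
          rw [PySem.Dict.get?_insert_self, PySem.List.index?_append_singleton_self _ _ hx]
          simp
        · rw [PySem.Dict.get?_insert_of_ne seen _ hv, hdict v]
          by_cases hm : v ∈ seq.toList
          · rw [PySem.List.index?_append_of_mem _ hm]
          · rw [(PySem.List.index?_eq_none_iff _ _).mpr hm,
              (PySem.List.index?_eq_none_iff _ _).mpr (by simp [hm, hv])]
      have hset' : ∀ v, PySem.Set.contains (PySem.Set.add found x) v = true
          ↔ v ∈ (seq.push x).toList := by
        intro v
        rw [Array.toList_push, PySem.Set.contains_iff _ _, PySem.Set.mem_add]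
        constructor
        · rintro (h | h)
          · exact List.mem_append_left _ ((hset v).mp ((PySem.Set.contains_iff _ _).mpr h))
          · simp [h]
        · intro h
          rcases List.mem_append.mp h with h | h
          · exact Or.inl ((PySem.Set.contains_iff _ _).mp ((hset v).mpr h))
          · simp at h; exact Or.inr h
      have := ih (seq.push x) (seen.insert x (seq.size : Int)) (PySem.Set.add found x)
        (digitalRootAlt (k * x)) (by simp; omega) hdict' hset'
      rw [T_eq]
      simpa [Int.natCast_add] using this

-- ===== VERDICT (by name: the statement is the Claim_ definition above) =====
theorem orbit_spec : Claim_equal_orbit := by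
  intro k start max_steps _
  unfold Spec_orbit orbit orbit_alt
  exact loop_eq k max_steps (max_steps.toNat) #[] PySem.Dict.empty PySem.Set.empty start
    (by simp) (fun v => by simp) (fun v => by simp [PySem.Set.empty])
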